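-- pv_equiv track=rewrite | github.com/nykimberly/playground-python | coding-challenges/coderust/array_edit_in_place.py | remove_white_spaces
-- ===== SOURCE A (Python) =====
-- WHITESPACES = {" ", "\t"}
--
-- def remove_white_spaces(s):
--    if s is None or len(s) == 0 or s[0] == "\0":
--       return s
--
--    r = 0
--    w = 0
--    while r < len(s):
--       if s[r] in WHITESPACES:
--          r += 1
--       else:
--          s[w] = s[r]
--          r += 1
--          w += 1
--    return s
-- ===== SOURCE B (Python) =====
-- WHITESPACES = {" ", "\t"}
--
-- def remove_white_spaces(s):
--     if s is None or len(s) == 0 or s[0] == "\0":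
--         return s
--     filtered = [c for c in s if c not in WHITESPACES]
--     for i, c in enumerate(filtered):
--         s[i] = c
--     return s
-- ===== Notes on version B (the rewrite author's own statement) =====
-- stated objective: simpler
-- what changed: Replaces the fused two-pointer read/write compaction loop by a one-pass filter comprehension followed by a copy-back pass over the filtered list; same in-place mutation and unchanged tail.
import Mathlib
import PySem

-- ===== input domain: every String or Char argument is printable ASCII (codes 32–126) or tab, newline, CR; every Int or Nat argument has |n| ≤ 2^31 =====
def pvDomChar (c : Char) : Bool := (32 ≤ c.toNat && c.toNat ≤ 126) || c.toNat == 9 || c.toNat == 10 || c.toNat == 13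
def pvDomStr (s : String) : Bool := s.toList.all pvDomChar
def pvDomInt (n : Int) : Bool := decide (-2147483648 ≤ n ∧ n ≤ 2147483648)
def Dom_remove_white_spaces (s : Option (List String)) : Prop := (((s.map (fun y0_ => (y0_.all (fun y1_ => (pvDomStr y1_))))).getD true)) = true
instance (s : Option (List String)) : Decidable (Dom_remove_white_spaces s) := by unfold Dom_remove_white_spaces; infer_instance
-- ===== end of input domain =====

-- B changes the algorithm (filter pass + copy-back pass instead of the fused
-- two-pointer compaction) for simplicity; equal cost. Both A and B mutate the
-- list in place in Python; the equivalence proved here is about the RETURN value.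

def WHITESPACES : PySem.Set String := PySem.Set.ofList [" ", "\t"]

-- ===== PORT A =====
-- the while loop: r reads, w writes (s.set keeps the length, so r strictly approaches it)
def removeLoopA (s : List String) (r w : Nat) : List String :=
  if h : r < s.length then
    if s[r] ∈ WHITESPACES then removeLoopA s (r + 1) w
    else removeLoopA (s.set w s[r]) (r + 1) (w + 1)
  else s
termination_by s.length - r
decreasing_by all_goals first | omega | (simp [List.length_set]; omega)

def remove_white_spaces (s : Option (List String)) : Option (List String) :=
  match s with
  | none => none
  | some l =>
    if l.length = 0 then some l
    else if l[0]? = some "\x00" then some l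
    else some (removeLoopA l 0 0)

-- ===== PORT B =====
-- 'for i, c in enumerate(filtered): s[i] = c'
def writeBack (s : List String) (i : Nat) : List String → List String
  | [] => s
  | c :: t => writeBack (s.set i c) (i + 1) t

def remove_white_spaces_alt (s : Option (List String)) : Option (List String) :=
  match s with
  | none => none
  | some l =>
    if l.length = 0 then some l
    else if l[0]? = some "\x00" then some l
    else
      let filtered := l.filter (fun c => decide (c ∉ WHITESPACES))
      some (writeBack l 0 filtered)

-- ===== PRECONDITION & SPEC =====
def Spec_remove_white_spaces (s : Option (List String)) (out : Option (List String)) : Prop := out = remove_white_spaces_alt s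
instance (s : Option (List String)) (out : Option (List String)) : Decidable (Spec_remove_white_spaces s out) := by unfold Spec_remove_white_spaces; infer_instance

-- ===== CLAIM (what is proved, stated in full; the proofs are below) =====
def Claim_equal_remove_white_spaces : Prop := ∀ (s : Option (List String)), Dom_remove_white_spaces s → Spec_remove_white_spaces s (remove_white_spaces s)

-- ===== LEMMAS AND PROOFS =====

-- overwriting position i (i < n) does not touch take i / the getElem at r > i / drop past i
lemma take_set_self (s : List String) (i : Nat) (c : String) (h : i < s.length) :
    (s.set i c).take (i + 1) = s.take i ++ [c] := by
  induction s generalizing i with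
  | nil => simp at h
  | cons a t ih =>
    cases i with
    | zero => simp
    | succ j =>
      simp only [List.length_cons] at h
      simp [List.set, List.take_succ_cons, ih j (by omega)]

lemma drop_set_of_lt (s : List String) (i n : Nat) (c : String) (h : i < n) :
    (s.set i c).drop n = s.drop n := by
  induction s generalizing i n with
  | nil => simp
  | cons a t ih =>
    cases i with
    | zero => cases n with
      | zero => omega
      | succ m => simp
    | succ j => cases n with
      | zero => omega
      | succ m => simp only [List.set, List.drop_succ_cons]; exact ih j m (by omega)

-- characterisation of A's loop: filtered middle, untouched tail
lemma removeLoopA_eq (s : List String) (r w : Nat) (hwr : w ≤ r) :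
    removeLoopA s r w =
      s.take w ++ (s.drop r).filter (fun c => decide (c ∉ WHITESPACES)) ++
        s.drop (w + ((s.drop r).filter (fun c => decide (c ∉ WHITESPACES))).length) := by
  by_cases h : r < s.length
  · have hdrop : s.drop r = s[r] :: s.drop (r + 1) := List.drop_eq_getElem_cons h
    by_cases hws : s[r] ∈ WHITESPACES
    · rw [removeLoopA]
      simp only [h, dif_pos, if_pos hws]
      rw [removeLoopA_eq s (r + 1) w (by omega)]
      have hf : (s.drop r).filter (fun c => decide (c ∉ WHITESPACES))
          = (s.drop (r + 1)).filter (fun c => decide (c ∉ WHITESPACES)) := by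
        rw [hdrop, List.filter_cons]
        simp [hws]
      rw [hf]
    · rw [removeLoopA]
      simp only [h, dif_pos, if_neg hws]
      rw [removeLoopA_eq (s.set w s[r]) (r + 1) (w + 1) (by omega)]
      have hw : w < s.length := by omega
      rw [drop_set_of_lt s w (r + 1) s[r] (by omega),
          take_set_self s w s[r] hw,
          drop_set_of_lt s w _ s[r] (by omega)]
      have hf : (s.drop r).filter (fun c => decide (c ∉ WHITESPACES))
          = s[r] :: (s.drop (r + 1)).filter (fun c => decide (c ∉ WHITESPACES)) := by
        rw [hdrop, List.filter_cons]
        simp [hws]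
      rw [hf]
      have harith : w + 1 + ((s.drop (r + 1)).filter (fun c => decide (c ∉ WHITESPACES))).length
          = w + ((s[r] :: (s.drop (r + 1)).filter (fun c => decide (c ∉ WHITESPACES))).length) := by
        simp
        omega
      rw [harith]
      simp
  · rw [removeLoopA]
    simp only [h, dif_neg, not_false_iff]
    have : s.drop r = [] := List.drop_eq_nil_of_le (by omega)
    simp [this]
termination_by s.length - r
decreasing_by all_goals first | omega | (simp [List.length_set]; omega)

-- characterisation of B's copy-back
lemma writeBack_eq (t : List String) (s : List String) (i : Nat)
    (h : i + t.length ≤ s.length) :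
    writeBack s i t = s.take i ++ t ++ s.drop (i + t.length) := by
  induction t generalizing s i with
  | nil => simp [writeBack]
  | cons c t ih =>
    simp only [writeBack]
    have hi : i < s.length := by simp at h; omega
    rw [ih (s.set i c) (i + 1) (by rw [List.length_set]; simp at h; omega)]
    rw [take_set_self s i c hi, drop_set_of_lt s i _ c (by omega)]
    have harith : i + 1 + t.length = i + (c :: t).length := by simp; omega
    rw [harith]
    simp

-- ===== VERDICT (by name: the statement is the Claim_ definition above) =====
theorem remove_white_spaces_spec : Claim_equal_remove_white_spaces := by
  intro s _
  unfold Spec_remove_white_spaces remove_white_spaces remove_white_spaces_alt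
  cases s with
  | none => rfl
  | some l =>
    by_cases h0 : l.length = 0
    · simp [h0]
    · by_cases hz : l[0]? = some "\x00"
      · simp [h0, hz]
      · simp only [h0, hz, if_false]
        congr 1
        rw [removeLoopA_eq l 0 0 le_rfl, List.drop_zero, List.take_zero,
            writeBack_eq _ l 0 (by simpa using List.length_filter_le _ l)]
        simp
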